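-- pv_equiv track=rewrite | github.com/chiachinggg/codewars-practice | 6. Domino Reactions.py | domino_falling
-- ===== SOURCE A (Python) =====
-- def domino_falling(s):
--     i=1
--     while(i<len(s)):
--         if (s[i] == "|"):
--             s[i] = "/"
--             i+=1
--         else:
--             break
--     return s
-- ===== SOURCE B (Python) =====
-- def domino_falling(s):
--     # No explicit scan loop: build a boolean mask of the tail, locate the first
--     # non-pipe with list.index, and overwrite the pipe prefix with one bulk
--     # slice assignment (same in-place mutation and return value as A).
--     marks = [x != "|" for x in s[1:]]
--     j = marks.index(True) if True in marks else len(marks)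
--     s[1:1 + j] = ["/"] * j
--     return s
-- ===== Notes on version B (the rewrite author's own statement) =====
-- stated objective: alternative
-- what changed: Replaces A's interleaved read/write while loop with a loop-free formulation: a boolean mask of the tail, list.index to locate the first non-pipe boundary, and one bulk slice assignment writing the '/' prefix.
import Mathlib
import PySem

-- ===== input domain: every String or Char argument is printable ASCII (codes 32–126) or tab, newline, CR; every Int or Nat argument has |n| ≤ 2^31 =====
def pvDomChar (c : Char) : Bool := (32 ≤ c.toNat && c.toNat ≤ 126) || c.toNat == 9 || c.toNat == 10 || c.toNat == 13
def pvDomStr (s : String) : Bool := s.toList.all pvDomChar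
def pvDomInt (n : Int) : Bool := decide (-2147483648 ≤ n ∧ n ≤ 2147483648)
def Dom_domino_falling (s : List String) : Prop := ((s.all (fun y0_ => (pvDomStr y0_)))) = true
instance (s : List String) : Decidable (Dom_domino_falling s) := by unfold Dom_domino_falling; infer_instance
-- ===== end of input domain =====

-- B replaces A's explicit while loop with a loop-free mask / list.index / bulk slice-assignment
-- formulation (alternative decomposition, same cost); both Pythons mutate the list in place the
-- same way, the equivalence proved here is on the return value.

-- ===== PORT A =====
-- A's while loop from index 1: if the current element is "|" replace it by "/" and advance,
-- else break; ported as the obvious structural recursion over the tail.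
def pvStepA : List String → List String
  | [] => []
  | x :: xs => if x = "|" then "/" :: pvStepA xs else x :: xs

def domino_falling (s : List String) : List String :=
  match s with
  | [] => []
  | h :: t => h :: pvStepA t

-- ===== PORT B =====
-- B: marks = [x != "|" for x in s[1:]];  j = marks.index(True) if True in marks else len(marks);
-- s[1:1+j] = ["/"] * j  (slice assignment = replicate j "/" ++ drop j on the tail).
def domino_falling_alt (s : List String) : List String :=
  match s with
  | [] => []
  | h :: t =>
    let marks := t.map (fun x => decide (x ≠ "|"))
    let j : Nat := if true ∈ marks then (PySem.List.index? marks true).getD 0 else marks.length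
    h :: (List.replicate j "/" ++ t.drop j)

-- ===== PRECONDITION & SPEC =====
def Spec_domino_falling (s : List String) (out : List String) : Prop := out = domino_falling_alt s
instance (s : List String) (out : List String) : Decidable (Spec_domino_falling s out) := by unfold Spec_domino_falling; infer_instance

-- ===== CLAIM =====
def Claim_equal_domino_falling : Prop := ∀ (s : List String), Dom_domino_falling s → Spec_domino_falling s (domino_falling s)

-- ===== LEMMAS AND PROOFS =====
theorem pvStepA_eq (t : List String) :
    pvStepA t =
      (let marks := t.map (fun x => decide (x ≠ "|"))
       let j : Nat := if true ∈ marks then (PySem.List.index? marks true).getD 0 else marks.length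
       List.replicate j "/" ++ t.drop j) := by
  induction t with
  | nil => rfl
  | cons x xs ih =>
    simp only at ih ⊢
    by_cases h : x = "|"
    · -- head is a pipe: its mark is false, the boundary index shifts by one
      simp only [pvStepA, List.map_cons, h]
      rw [show (decide (("|" : String) ≠ "|")) = false from by simp,
        PySem.List.index?_cons_of_ne _ (by simp), if_pos trivial]
      simp only [show (true ∈ false :: List.map (fun x => decide (x ≠ "|")) xs) ↔
        (true ∈ List.map (fun x => decide (x ≠ "|")) xs) from by simp]
      by_cases hm : true ∈ xs.map (fun x => decide (x ≠ "|"))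
      · obtain ⟨k, hk⟩ := Option.isSome_iff_exists.mp
          ((PySem.List.index?_isSome_iff _ _).mpr hm)
        rw [ih, if_pos hm, if_pos hm, hk]
        simp [List.replicate_succ]
      · rw [ih, if_neg hm, if_neg hm]
        simp [List.replicate_succ]
    · -- head is not a pipe: its mark is true at position 0, nothing is rewritten
      have hx : (decide (x ≠ "|")) = true := by simp [h]
      simp only [pvStepA, if_neg h, List.map_cons, hx]
      rw [PySem.List.index?_cons_self, if_pos (List.mem_cons_self)]
      simp

-- ===== VERDICT =====
theorem domino_falling_spec : Claim_equal_domino_falling := by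
  intro s _
  unfold Spec_domino_falling domino_falling domino_falling_alt
  cases s with
  | nil => rfl
  | cons h t => simpa using congrArg (h :: ·) (pvStepA_eq t)
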